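-- pv_equiv track=rewrite | github.com/ryowatanabe/inf_daken_counter_2_inf_notebook | migrate.py | compute_dj_level
-- ===== SOURCE A (Python) =====
-- import math
--
-- def compute_dj_level(score: int | None, notes: int | None) -> str:
--     """IIDX の DJ LEVEL を score と notes から算出する。
--
--     IIDX の計算式: score >= ceil(N/9 * notes * 2) → DJ LEVEL
--     N=8: AAA, N=7: AA, N=6: A, N=5: B, N=4: C, N=3: D, N=2: E, それ以下: F
--     """
--     if score is None or notes is None or notes == 0:
--         return 'F'
--     max_score = notes * 2
--     thresholds = [
--         ('AAA', 8), ('AA', 7), ('A', 6), ('B', 5),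
--         ('C', 4), ('D', 3), ('E', 2),
--     ]
--     for level, n in thresholds:
--         if score >= math.ceil(n / 9 * max_score):
--             return level
--     return 'F'
-- ===== SOURCE B (Python) =====
-- import math
--
-- def compute_dj_level(score, notes):
--     if score is None or notes is None or notes == 0:
--         return 'F'
--     max_score = notes * 2
--     qual = [n for n in range(2, 9) if score >= math.ceil(n / 9 * max_score)]
--     names = {8: 'AAA', 7: 'AA', 6: 'A', 5: 'B', 4: 'C', 3: 'D', 2: 'E'}
--     return names.get(max(qual, default=0), 'F')
-- ===== Notes on version B (the rewrite author's own statement) =====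
-- stated objective: idiomatic
-- what changed: B replaces A's ordered early-return scan over a (level, N) threshold table by a list comprehension collecting all qualifying N of range(2,9), taking max(qual, default=0), and mapping it through a dict of grade names (same float threshold expression, so exactly equivalent).
import Mathlib
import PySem

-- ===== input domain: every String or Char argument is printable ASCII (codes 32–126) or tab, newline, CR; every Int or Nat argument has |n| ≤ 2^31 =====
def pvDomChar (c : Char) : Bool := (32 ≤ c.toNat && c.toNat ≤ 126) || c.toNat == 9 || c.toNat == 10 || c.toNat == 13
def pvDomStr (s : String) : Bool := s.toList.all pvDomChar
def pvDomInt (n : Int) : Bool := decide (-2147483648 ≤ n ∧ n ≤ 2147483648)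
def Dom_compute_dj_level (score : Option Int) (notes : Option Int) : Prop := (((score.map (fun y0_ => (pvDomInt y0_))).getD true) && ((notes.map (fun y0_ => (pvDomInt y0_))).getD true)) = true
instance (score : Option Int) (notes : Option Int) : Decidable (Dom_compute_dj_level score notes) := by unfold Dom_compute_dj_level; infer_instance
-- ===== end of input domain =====

-- B replaces A's ordered early-return scan over a (level, N) table by a comprehension
-- collecting all qualifying N, taking their maximum, and mapping it through a dict
-- (objective: idiomatic; same float threshold expression, so exact equivalence).

-- Shared primitive: exact integer model of Python's `math.ceil(n / 9 * m)` for
-- n ∈ {2..8} and |m| ≤ 2^34 (IEEE-754 double arithmetic, round-to-nearest-even,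
-- simulated exactly: `cnMant n` is the exact mantissa/exponent of the double n/9).
def cnMant (n : Int) : Int × Nat :=
  if n = 2 then (2001599834386887, 53)
  else if n = 3 then (6004799503160661, 54)
  else if n = 4 then (2001599834386887, 52)
  else if n = 5 then (2501999792983609, 52)
  else if n = 6 then (6004799503160661, 53)
  else if n = 7 then (7005599420354105, 53)
  else (2001599834386887, 51)

def ceilThr (n : Int) (m : Int) : Int :=
  let p := cnMant n
  let x := p.1 * m
  if x = 0 then 0 else
  let s : Int := if 0 < x then 1 else -1
  let a := x.natAbs
  let bits := Nat.log2 a + 1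
  let a' := if 53 < bits then
      let drop := bits - 53
      let q := a / 2 ^ drop
      let r := a % 2 ^ drop
      let half := 2 ^ (drop - 1)
      let q' := if half < r ∨ (r = half ∧ q % 2 = 1) then q + 1 else q
      q' * 2 ^ drop
    else a
  let x' : Int := s * (a' : Int)
  Int.neg (PySem.Int.floordiv (Int.neg x') ((2:Int) ^ p.2))

-- ===== PORT A =====
def scanThrA : List (String × Int) → Int → Int → String
  | [], _, _ => "F"
  | (level, n) :: rest, score, ms =>
      if score ≥ ceilThr n ms then level else scanThrA rest score ms

def compute_dj_level (score : Option Int) (notes : Option Int) : String :=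
  match score, notes with
  | none, _ => "F"
  | _, none => "F"
  | some s, some nt =>
    if nt = 0 then "F" else
    let max_score := nt * 2
    scanThrA [("AAA", 8), ("AA", 7), ("A", 6), ("B", 5), ("C", 4), ("D", 3), ("E", 2)] s max_score

-- ===== PORT B =====
def compute_dj_level_alt (score : Option Int) (notes : Option Int) : String :=
  match score, notes with
  | some s, some nt =>
    if nt = 0 then "F" else
    let max_score := nt * 2
    let qual := (PySem.List.pyRange 2 9 1).filter (fun n => decide (s ≥ ceilThr n max_score))
    let names : PySem.Dict Int String :=
      PySem.Dict.ofList [(8, "AAA"), (7, "AA"), (6, "A"), (5, "B"), (4, "C"), (3, "D"), (2, "E")]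
    PySem.Dict.getD names ((PySem.List.max? qual (fun x => x)).getD 0) "F"
  | _, _ => "F"

-- ===== PRECONDITION & SPEC =====
def Spec_compute_dj_level (score : Option Int) (notes : Option Int) (out : String) : Prop := out = compute_dj_level_alt score notes
instance (score : Option Int) (notes : Option Int) (out : String) : Decidable (Spec_compute_dj_level score notes out) := by unfold Spec_compute_dj_level; infer_instance

-- ===== CLAIM (what is proved, stated in full; the proofs are below) =====
def Claim_equal_compute_dj_level : Prop := ∀ (score : Option Int) (notes : Option Int), Dom_compute_dj_level score notes → Spec_compute_dj_level score notes (compute_dj_level score notes)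

-- ===== LEMMAS AND PROOFS =====

theorem pyRange_2_9 : PySem.List.pyRange 2 9 1 = [2, 3, 4, 5, 6, 7, 8] := by decide

set_option maxHeartbeats 2000000 in
theorem core_eq (s ms : Int) :
    scanThrA [("AAA", 8), ("AA", 7), ("A", 6), ("B", 5), ("C", 4), ("D", 3), ("E", 2)] s ms
      = PySem.Dict.getD
          (PySem.Dict.ofList [(8, "AAA"), (7, "AA"), (6, "A"), (5, "B"), (4, "C"), (3, "D"), (2, "E")])
          ((PySem.List.max? ((PySem.List.pyRange 2 9 1).filter (fun n => decide (s ≥ ceilThr n ms))) (fun x => x)).getD 0) "F" := by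
  rw [pyRange_2_9]
  by_cases c8 : s ≥ ceilThr 8 ms <;>
  by_cases c7 : s ≥ ceilThr 7 ms <;>
  by_cases c6 : s ≥ ceilThr 6 ms <;>
  by_cases c5 : s ≥ ceilThr 5 ms <;>
  by_cases c4 : s ≥ ceilThr 4 ms <;>
  by_cases c3 : s ≥ ceilThr 3 ms <;>
  by_cases c2 : s ≥ ceilThr 2 ms <;>
  simp [scanThrA, c2, c3, c4, c5, c6, c7, c8, PySem.List.max?, PySem.Dict.getD,
    PySem.Dict.get?, PySem.Dict.ofList] <;> decide

-- ===== VERDICT (by name: the statement is the Claim_ definition above) =====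
theorem compute_dj_level_spec : Claim_equal_compute_dj_level := by
  intro score notes _
  unfold Spec_compute_dj_level compute_dj_level compute_dj_level_alt
  match score, notes with
  | none, _ => rfl
  | some s, none => rfl
  | some s, some nt =>
    by_cases h : nt = 0
    · simp [h]
    · simp only [h, if_false]
      exact core_eq s (nt * 2)
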